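-- pv_equiv track=rewrite | github.com/orensultan/FormalGeo | src/formalgeo/verifier/verifier.py | get_processed_model_resp
-- ===== SOURCE A (Python) =====
-- def convert_theorem_seqs_format_string(input_str):
--     # Remove leading and trailing single quotes if present
--     input_str = input_str.strip("'")
--
--     # Split the input string by lines
--     lines = input_str.strip().splitlines()
--
--     converted_list = []
--
--     for line in lines:
--         line = line.strip()
--         if line.startswith("step_id:"):
--             # Split the line by ';' and extract labeled parts
--             parts = [part.split(":", 1)[1].strip() for part in line.split(";") if ":" in part]
--         else:
--             # Assume the line is unlabeled and split by ';'
--             parts = [part.strip() for part in line.split(";")]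
--
--         step_id = parts[0] if len(parts) > 0 else ""
--         theorem = parts[1] if len(parts) > 1 else ""
--         premise = parts[2] if len(parts) > 2 else ""
--         conclusion = parts[3] if len(parts) > 3 else ""
--
--         converted_list.append(f"{step_id};{theorem};{premise};{conclusion}")
--
--     return "\n".join(converted_list)
--
-- def get_processed_model_resp(resp):
--     """Process model response and return list of (theorem, premises, conclusions) triplets."""
--     generated_theorem_sequence = resp.split("THEOREM_SEQUENCE:\n")[1] if len(resp.split("THEOREM_SEQUENCE:\n")) > 1 else ""
--     generated_theorem_sequence = convert_theorem_seqs_format_string(generated_theorem_sequence) if generated_theorem_sequence != "" else ""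
--
--     if generated_theorem_sequence == "":
--         return []
--
--     # Process each line into a triplet
--     triplets = []
--     for line in generated_theorem_sequence.strip().split("\n"):
--         parts = line.split(";")
--         if len(parts) >= 3:
--             theorem = parts[1].strip()
--             premises = parts[2].strip()
--             conclusions = parts[3].strip() if len(parts) > 3 else "[]"
--             triplets.append((theorem, premises, conclusions))
--
--     return triplets
-- ===== SOURCE B (Python) =====
-- def get_processed_model_resp(resp):
--     """Process model response and return list of (theorem, premises, conclusions) triplets."""
--     parts = resp.split("THEOREM_SEQUENCE:\n")
--     if len(parts) < 2:
--         return []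
--     triplets = []
--     for raw in parts[1].strip("'").strip().splitlines():
--         line = raw.strip()
--         if line.startswith("step_id:"):
--             fields = [p.split(":", 1)[1].strip() for p in line.split(";") if ":" in p]
--         else:
--             fields = [p.strip() for p in line.split(";")]
--         fields = fields + [""] * (4 - len(fields))
--         triplets.append((fields[1], fields[2], fields[3]))
--     return triplets
-- ===== Notes on version B (the rewrite author's own statement) =====
-- stated objective: simpler
-- what changed: B computes the (theorem, premise, conclusion) triplets directly in one pass over the split lines, eliminating A's serialize-to-joined-string-then-reparse round trip through convert_theorem_seqs_format_string.
import Mathlib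
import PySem

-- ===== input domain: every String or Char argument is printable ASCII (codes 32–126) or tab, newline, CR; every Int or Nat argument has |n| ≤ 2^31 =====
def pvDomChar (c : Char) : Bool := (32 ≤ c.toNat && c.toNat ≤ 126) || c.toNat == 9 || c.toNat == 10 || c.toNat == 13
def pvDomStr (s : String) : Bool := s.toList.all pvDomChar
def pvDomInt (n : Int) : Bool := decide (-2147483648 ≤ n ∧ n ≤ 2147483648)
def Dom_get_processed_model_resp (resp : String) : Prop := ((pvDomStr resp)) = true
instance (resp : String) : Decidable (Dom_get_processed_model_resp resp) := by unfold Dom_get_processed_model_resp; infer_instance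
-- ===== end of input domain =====

-- B computes the (theorem, premise, conclusion) triplets in ONE pass over the lines, dropping A's
-- serialize-to-string-then-reparse round trip (simpler decomposition, same return value).

-- ===== PORT A =====
-- labeled/unlabeled field extraction of convert_theorem_seqs_format_string's loop body
def pvPartsA (line : String) : List String :=
  if PySem.Str.startswith line "step_id:" = true then
    ((PySem.Str.split? line ";").getD []).filterMap (fun p =>
      if PySem.Str.isIn ":" p = true then
        some (PySem.Str.strip (((PySem.Str.splitMax? p ":" 1).getD []).getD 1 ""))
      else none)
  else
    ((PySem.Str.split? line ";").getD []).map PySem.Str.strip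

-- loop body of convert_theorem_seqs_format_string; the f-string is the ";"-join of the four fields
def pvMkLineA (line0 : String) : String :=
  let line := PySem.Str.strip line0
  let parts := pvPartsA line
  PySem.Str.join ";" [parts.getD 0 "", parts.getD 1 "", parts.getD 2 "", parts.getD 3 ""]

def convert_theorem_seqs_format_string (input_str : String) : String :=
  let s := PySem.Str.stripChars input_str "'"
  let lines := PySem.Str.splitlines (PySem.Str.strip s)
  PySem.Str.join "\n" (lines.map pvMkLineA)

def get_processed_model_resp (resp : String) : List (String × String × String) :=
  let sp := (PySem.Str.split? resp "THEOREM_SEQUENCE:\n").getD []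
  let g0 := if 1 < sp.length then sp.getD 1 "" else ""
  let g := if g0 ≠ "" then convert_theorem_seqs_format_string g0 else ""
  if g = "" then []
  else
    ((PySem.Str.split? (PySem.Str.strip g) "\n").getD []).foldl (fun acc line =>
      let parts := (PySem.Str.split? line ";").getD []
      if 3 ≤ parts.length then
        acc ++ [(PySem.Str.strip (parts.getD 1 ""), PySem.Str.strip (parts.getD 2 ""),
                 if 3 < parts.length then PySem.Str.strip (parts.getD 3 "") else "[]")]
      else acc) []

-- ===== PORT B =====
-- labeled/unlabeled field extraction of B's loop (textually the same sub-expression as in A's source)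
def pvFieldsB (line : String) : List String :=
  if PySem.Str.startswith line "step_id:" = true then
    ((PySem.Str.split? line ";").getD []).filterMap (fun p =>
      if PySem.Str.isIn ":" p = true then
        some (PySem.Str.strip (((PySem.Str.splitMax? p ":" 1).getD []).getD 1 ""))
      else none)
  else
    ((PySem.Str.split? line ";").getD []).map PySem.Str.strip

-- loop body of B: pad the fields to 4 with "" and emit the triplet directly
def pvTripletB (raw : String) : String × String × String :=
  let line := PySem.Str.strip raw
  let fields0 := pvFieldsB line
  let fields := fields0 ++ List.replicate (4 - fields0.length) ""
  (fields.getD 1 "", fields.getD 2 "", fields.getD 3 "")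

def get_processed_model_resp_alt (resp : String) : List (String × String × String) :=
  let parts := (PySem.Str.split? resp "THEOREM_SEQUENCE:\n").getD []
  if parts.length < 2 then []
  else
    (PySem.Str.splitlines (PySem.Str.strip (PySem.Str.stripChars (parts.getD 1 "") "'"))).map pvTripletB

-- ===== PRECONDITION & SPEC =====
def Spec_get_processed_model_resp (resp : String) (out : List (String × String × String)) : Prop := out = get_processed_model_resp_alt resp
instance (resp : String) (out : List (String × String × String)) : Decidable (Spec_get_processed_model_resp resp out) := by unfold Spec_get_processed_model_resp; infer_instance

-- ===== CLAIM (what is proved, stated in full; the proofs are below) =====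
def Claim_equal_get_processed_model_resp : Prop := ∀ (resp : String), Dom_get_processed_model_resp resp → Spec_get_processed_model_resp resp (get_processed_model_resp resp)

-- ===== LEMMAS AND PROOFS =====

-- a char list that does not start or end with whitespace (the shape `strip` produces)
def pvOK (cs : List Char) : Prop :=
  (∀ c, cs.head? = some c → PySem.Chars.isspace c = false) ∧
  (∀ c, cs.getLast? = some c → PySem.Chars.isspace c = false)

theorem pvOK_nil : pvOK [] := by constructor <;> intro c h <;> simp at h

theorem pvDropWhile_head (p : Char → Bool) (l : List Char) (c : Char)
    (h : (l.dropWhile p).head? = some c) : p c = false := by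
  induction l with
  | nil => simp at h
  | cons a t ih =>
    by_cases hp : p a
    · simp [hp] at h; exact ih h
    · simp [hp] at h; subst h; simpa using hp

theorem pvOK_strip (cs : List Char) : pvOK (PySem.Chars.strip cs) := by
  simp only [PySem.Chars.strip, PySem.Chars.rstrip, PySem.Chars.lstrip]
  set p := PySem.Chars.isspace with hp
  set l1 := cs.dropWhile p with hl1
  constructor
  · intro c h
    rw [List.head?_reverse] at h
    rcases List.dropWhile_suffix (l := l1.reverse) p with ⟨w, hw⟩
    cases hY : l1.reverse.dropWhile p with
    | nil => rw [hY] at h; simp at h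
    | cons a t =>
      have h2 : l1.reverse.getLast? = some c := by
        rw [← hw, List.getLast?_append_of_ne_nil w (by simp [hY])]; exact h
      rw [List.getLast?_reverse] at h2
      exact pvDropWhile_head p cs c (hl1 ▸ h2)
  · intro c h
    rw [List.getLast?_reverse] at h
    exact pvDropWhile_head p _ c h

theorem pv_strip_eq_self (cs : List Char) (h : pvOK cs) : PySem.Chars.strip cs = cs := by
  obtain ⟨h1, h2⟩ := h
  have e1 : PySem.Chars.lstrip cs = cs := by
    cases cs with
    | nil => rfl
    | cons a t =>
      simp only [PySem.Chars.lstrip, List.dropWhile_cons]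
      simp [h1 a rfl]
  rw [PySem.Chars.strip, e1, PySem.Chars.rstrip]
  have e2 : cs.reverse.dropWhile PySem.Chars.isspace = cs.reverse := by
    cases hc : cs.reverse with
    | nil => simp
    | cons a t =>
      rw [List.dropWhile_cons]
      have ha : cs.getLast? = some a := by
        rw [← List.head?_reverse, hc]; rfl
      simp [h2 a ha]
  rw [e2, List.reverse_reverse]

theorem pv_mem_strip {x : Char} {cs : List Char} (h : x ∈ PySem.Chars.strip cs) : x ∈ cs := by
  simp only [PySem.Chars.strip, PySem.Chars.rstrip, PySem.Chars.lstrip, List.mem_reverse] at h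
  have h2 := (List.dropWhile_sublist _).mem h
  rw [List.mem_reverse] at h2
  exact (List.dropWhile_sublist _).mem h2

-- characters of splitOn.go results come from the input / accumulators
theorem pvSplitGo_subset (sep : List Char) (fuel : Nat) :
    ∀ (l cur : List Char) (acc : List (List Char)) (p : List Char),
      p ∈ PySem.Chars.splitOn.go sep fuel l cur acc →
      ∀ x ∈ p, x ∈ l ∨ x ∈ cur ∨ ∃ q ∈ acc, x ∈ q := by
  induction fuel with
  | zero =>
    intro l cur acc p hp x hx
    rw [PySem.Chars.splitOn.go.eq_def] at hp
    simp at hp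
    rcases hp with h | h
    · right; right; exact ⟨p, h, hx⟩
    · subst h; rcases List.mem_append.1 hx with h | h
      · right; left; simpa using h
      · left; exact h
  | succ f ih =>
    intro l cur acc p hp x hx
    cases l with
    | nil =>
      rw [PySem.Chars.splitOn.go.eq_def] at hp
      simp at hp
      rcases hp with h | h
      · right; right; exact ⟨p, h, hx⟩
      · subst h; right; left; simpa using hx
    | cons a rest =>
      rw [PySem.Chars.splitOn.go.eq_def] at hp
      simp only at hp
      split at hp
      · rcases ih _ _ _ _ hp x hx with h | h | ⟨q, hq, hxq⟩
        · left; exact (List.mem_of_mem_drop h)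
        · simp at h
        · rcases List.mem_cons.1 hq with h | h
          · right; left; subst h; simpa using hxq
          · right; right; exact ⟨q, h, hxq⟩
      · rcases ih _ _ _ _ hp x hx with h | h | ⟨q, hq, hxq⟩
        · left; exact List.mem_cons_of_mem a h
        · rcases List.mem_cons.1 h with h | h
          · left; simp [h]
          · right; left; exact h
        · right; right; exact ⟨q, hq, hxq⟩

theorem pvSplitOn_subset {x : Char} {p l sep : List Char}
    (hp : p ∈ PySem.Chars.splitOn l sep) (hx : x ∈ p) : x ∈ l := by
  rw [PySem.Chars.splitOn] at hp
  rcases pvSplitGo_subset sep _ _ _ _ _ hp x hx with h | h | ⟨q, hq, _⟩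
  · exact h
  · simp at h
  · simp at hq

theorem pvSplitGo_nil (sep : List Char) (fuel : Nat) (cur : List Char) (acc : List (List Char)) :
    PySem.Chars.splitOn.go sep fuel [] cur acc = (cur.reverse :: acc).reverse := by
  cases fuel with
  | zero => rw [PySem.Chars.splitOn.go.eq_def]; simp
  | succ f => rw [PySem.Chars.splitOn.go.eq_def]

-- pieces of a single-character split never contain the separator
theorem pvSplitGo_not_mem (c : Char) (fuel : Nat) :
    ∀ (l cur : List Char) (acc : List (List Char)),
      l.length < fuel → c ∉ cur → (∀ q ∈ acc, c ∉ q) →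
      ∀ p ∈ PySem.Chars.splitOn.go [c] fuel l cur acc, c ∉ p := by
  induction fuel with
  | zero => intro l cur acc h; exact absurd h (by omega)
  | succ f ih =>
    intro l cur acc hlen hcur hacc p hp
    cases l with
    | nil =>
      rw [pvSplitGo_nil] at hp
      simp at hp
      rcases hp with h | h
      · exact hacc p h
      · subst h; simpa using hcur
    | cons a rest =>
      rw [PySem.Chars.splitOn.go.eq_def] at hp
      simp only at hp
      split at hp
      · refine ih _ _ _ ?_ (by simp) ?_ p hp
        · simp at hlen ⊢; omega
        · intro q hq
          rcases List.mem_cons.1 hq with h | h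
          · subst h; simpa using hcur
          · exact hacc q h
      · rename_i hpre
        have hac : a ≠ c := by
          intro h; subst h; simp [List.isPrefixOf] at hpre
        refine ih _ _ _ ?_ ?_ hacc p hp
        · simp at hlen ⊢; omega
        · intro h
          rcases List.mem_cons.1 h with h | h
          · exact hac h.symm
          · exact hcur h

theorem pvSplitOn_not_mem {c : Char} {p l : List Char}
    (hp : p ∈ PySem.Chars.splitOn l [c]) : c ∉ p := by
  rw [PySem.Chars.splitOn] at hp
  exact pvSplitGo_not_mem c _ _ _ _ (by omega) (by simp) (by simp) p hp

-- splitOn.go consumes a separator-free prefix into cur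
theorem pvSplitGo_consume (c : Char) (piece : List Char) (hpc : c ∉ piece) :
    ∀ (fuel : Nat) (l cur : List Char) (acc : List (List Char)), piece.length < fuel →
      PySem.Chars.splitOn.go [c] fuel (piece ++ l) cur acc =
      PySem.Chars.splitOn.go [c] (fuel - piece.length) l (piece.reverse ++ cur) acc := by
  induction piece with
  | nil => intro fuel l cur acc h; simp
  | cons a p ih =>
    intro fuel l cur acc h
    cases fuel with
    | zero => omega
    | succ f =>
      rw [PySem.Chars.splitOn.go.eq_def]
      have hac : ([c].isPrefixOf (a :: (p ++ l))) = false := by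
        have ha : a ≠ c := fun h' => hpc (h' ▸ List.mem_cons_self)
        simp [List.isPrefixOf]
        intro h'; exact absurd h'.symm ha
      simp [hac]
      rw [ih (fun h' => hpc (List.mem_cons_of_mem a h')) f l (a :: cur) acc (by simpa using h)]

theorem pvSplitGo_sep (c : Char) (f : Nat) (l cur : List Char) (acc : List (List Char)) :
    PySem.Chars.splitOn.go [c] (f+1) (c :: l) cur acc =
    PySem.Chars.splitOn.go [c] f l [] (cur.reverse :: acc) := by
  rw [PySem.Chars.splitOn.go.eq_def]
  have h : ([c].isPrefixOf (c :: l)) = true := by simp [List.isPrefixOf]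
  simp [h]

theorem pvSplitOn_intercalate_aux (c : Char) :
    ∀ (pieces : List (List Char)), pieces ≠ [] → (∀ p ∈ pieces, c ∉ p) →
    ∀ (fuel : Nat) (acc : List (List Char)), (List.intercalate [c] pieces).length < fuel →
      PySem.Chars.splitOn.go [c] fuel (List.intercalate [c] pieces) [] acc = acc.reverse ++ pieces := by
  intro pieces
  induction pieces with
  | nil => intro h; exact absurd rfl h
  | cons p ps ih =>
    intro _ hmem fuel acc hlen
    cases ps with
    | nil =>
      have e : List.intercalate [c] [p] = p := by simp [List.intercalate]
      rw [e] at hlen ⊢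
      have hc := pvSplitGo_consume c p (hmem p (by simp)) fuel [] [] acc (by omega)
      simp only [List.append_nil] at hc
      rw [hc, pvSplitGo_nil]
      simp
    | cons q qs =>
      have e : List.intercalate [c] (p :: q :: qs) = p ++ c :: List.intercalate [c] (q :: qs) := by
        simp [List.intercalate]
      rw [e] at hlen ⊢
      rw [pvSplitGo_consume c p (hmem p (by simp)) fuel _ [] acc (by simp at hlen; omega)]
      have hf : fuel - p.length = (fuel - p.length - 1) + 1 := by simp at hlen; omega
      rw [hf, pvSplitGo_sep]
      rw [ih (by simp) (fun r hr => hmem r (List.mem_cons_of_mem p hr)) _ _ (by simp at hlen ⊢; omega)]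
      simp

-- splitting the single-char join of separator-free pieces recovers the pieces
theorem pvSplitOn_intercalate (c : Char) (pieces : List (List Char))
    (hne : pieces ≠ []) (hp : ∀ p ∈ pieces, c ∉ p) :
    PySem.Chars.splitOn (List.intercalate [c] pieces) [c] = pieces := by
  rw [PySem.Chars.splitOn]
  rw [pvSplitOn_intercalate_aux c pieces hne hp _ [] (by omega)]
  simp

-- characters of splitOnMax.go results come from the input / accumulators
theorem pvMaxGo_subset (sep : List Char) (fuel : Nat) :
    ∀ (m : Nat) (l cur : List Char) (acc : List (List Char)) (p : List Char),
      p ∈ PySem.Chars.splitOnMax.go sep fuel m l cur acc →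
      ∀ x ∈ p, x ∈ l ∨ x ∈ cur ∨ ∃ q ∈ acc, x ∈ q := by
  induction fuel with
  | zero =>
    intro m l cur acc p hp x hx
    rw [PySem.Chars.splitOnMax.go.eq_def] at hp
    simp at hp
    rcases hp with h | h
    · right; right; exact ⟨p, h, hx⟩
    · subst h; rcases List.mem_append.1 hx with h | h
      · right; left; simpa using h
      · left; exact h
  | succ f ih =>
    intro m l cur acc p hp x hx
    cases l with
    | nil =>
      rw [PySem.Chars.splitOnMax.go.eq_def] at hp
      simp at hp
      rcases hp with h | h
      · right; right; exact ⟨p, h, hx⟩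
      · subst h; right; left; simpa using hx
    | cons a rest =>
      rw [PySem.Chars.splitOnMax.go.eq_def] at hp
      simp only at hp
      split at hp
      · simp at hp
        rcases hp with h | h
        · right; right; exact ⟨p, h, hx⟩
        · subst h; rcases List.mem_append.1 hx with h | h
          · right; left; simpa using h
          · left; exact h
      · split at hp
        · rcases ih _ _ _ _ _ hp x hx with h | h | ⟨q, hq, hxq⟩
          · left; exact (List.mem_of_mem_drop h)
          · simp at h
          · rcases List.mem_cons.1 hq with h | h
            · right; left; subst h; simpa using hxq
            · right; right; exact ⟨q, h, hxq⟩
        · rcases ih _ _ _ _ _ hp x hx with h | h | ⟨q, hq, hxq⟩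
          · left; exact List.mem_cons_of_mem a h
          · rcases List.mem_cons.1 h with h | h
            · left; simp [h]
            · right; left; exact h
          · right; right; exact ⟨q, hq, hxq⟩

theorem pvSplitOnMax_subset {x : Char} {p l sep : List Char} {m : Int}
    (hp : p ∈ PySem.Chars.splitOnMax l sep m) (hx : x ∈ p) : x ∈ l := by
  rw [PySem.Chars.splitOnMax] at hp
  split at hp
  · exact pvSplitOn_subset hp hx
  · rcases pvMaxGo_subset sep _ _ _ _ _ _ hp x hx with h | h | ⟨q, hq, _⟩
    · exact h
    · simp at h
    · simp at hq

-- pieces of splitlines.go contain no line-break characters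
theorem pvSplitlinesGo_no_break (isB : Char → Bool) :
    ∀ (n : Nat) (s : List Char), s.length ≤ n → ∀ (cur : List Char) (acc : List (List Char)),
      (∀ x ∈ cur, isB x = false) → (∀ q ∈ acc, ∀ x ∈ q, isB x = false) →
      ∀ p ∈ PySem.Chars.splitlines.go isB s cur acc, ∀ x ∈ p, isB x = false := by
  intro n
  induction n with
  | zero =>
    intro s hs cur acc hcur hacc p hp x hx
    have : s = [] := by cases s <;> simp_all
    subst this
    rw [PySem.Chars.splitlines.go.eq_def] at hp
    split at hp
    · split at hp
      · exact hacc p (by simpa using hp) x hx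
      · simp at hp
        rcases hp with h | h
        · exact hacc p h x hx
        · subst h; exact hcur x (by simpa using hx)
    · simp_all
    · simp_all
  | succ m ih =>
    intro s hs cur acc hcur hacc p hp x hx
    rw [PySem.Chars.splitlines.go.eq_def] at hp
    split at hp
    · split at hp
      · exact hacc p (by simpa using hp) x hx
      · simp at hp
        rcases hp with h | h
        · exact hacc p h x hx
        · subst h; exact hcur x (by simpa using hx)
    · refine ih _ (by simp at hs; omega) [] (cur.reverse :: acc) (by simp) ?_ p hp x hx
      intro q hq
      rcases List.mem_cons.1 hq with h | h
      · subst h; intro y hy; exact hcur y (by simpa using hy)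
      · exact hacc q h
    · split at hp
      · refine ih _ (by simp at hs; omega) [] (cur.reverse :: acc) (by simp) ?_ p hp x hx
        intro q hq
        rcases List.mem_cons.1 hq with h | h
        · subst h; intro y hy; exact hcur y (by simpa using hy)
        · exact hacc q h
      · next hB =>
        refine ih _ (by simp at hs; omega) _ acc ?_ hacc p hp x hx
        intro y hy
        rcases List.mem_cons.1 hy with h | h
        · subst h; simpa using hB
        · exact hcur y h

theorem pvSplitlines_no_newline {p s : List Char}
    (hp : p ∈ PySem.Chars.splitlines s) : '\n' ∉ p := by
  intro hn
  have := pvSplitlinesGo_no_break _ s.length s (le_refl _) [] [] (by simp) (by simp) p hp '\n' hn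
  simp at this

theorem pvGetD_cases (l : List String) (i : Nat) : l.getD i "" = "" ∨ l.getD i "" ∈ l := by
  by_cases h : i < l.length
  · right; rw [List.getD_eq_getElem l _ h]; exact List.getElem_mem _
  · left; exact List.getD_eq_default _ _ (by omega)

theorem pvGetD_pad (l : List String) (k i : Nat) :
    (l ++ List.replicate k "").getD i "" = l.getD i "" := by
  by_cases h : i < l.length
  · rw [List.getD_eq_getElem _ _ (by simp; omega), List.getD_eq_getElem l _ h,
      List.getElem_append_left h]
  · rw [List.getD_eq_default l _ (by omega)]
    by_cases h2 : i < l.length + k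
    · rw [List.getD_eq_getElem _ _ (by simp; omega), List.getElem_append_right (by omega)]
      simp
    · rw [List.getD_eq_default _ _ (by simp; omega)]

-- the string-level split with a nonempty separator, written out
theorem pvStrSplit (s sep : String) (hsep : sep.toList ≠ []) :
    (PySem.Str.split? s sep).getD [] =
      (PySem.Chars.splitOn s.toList sep.toList).map String.ofList := by
  rw [PySem.Str.split?, PySem.Chars.split?]
  simp [List.isEmpty_iff, hsep]

-- every field that A serializes / B emits: stripped at both ends, no ';', chars from line
theorem pvParts_spec (line : String) :
    ∀ f ∈ pvPartsA line, pvOK f.toList ∧ ∀ x ∈ f.toList, x ∈ line.toList ∧ x ≠ ';' := by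
  intro f hf
  rw [pvPartsA] at hf
  rw [pvStrSplit line ";" (by decide)] at hf
  split at hf
  · rw [List.mem_filterMap] at hf
    obtain ⟨p, hp, hpf⟩ := hf
    split at hpf
    · rw [Option.some_inj] at hpf
      subst hpf
      rw [List.mem_map] at hp
      obtain ⟨pc, hpc, rfl⟩ := hp
      refine ⟨by rw [PySem.Str.toList_strip]; exact pvOK_strip _, ?_⟩
      intro x hx
      rw [PySem.Str.toList_strip] at hx
      have hxq := pv_mem_strip hx
      set q := ((PySem.Str.splitMax? (String.ofList pc) ":" 1).getD []).getD 1 "" with hq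
      have hsub : ∀ y ∈ q.toList, y ∈ pc := by
        intro y hy
        rw [hq, PySem.Str.splitMax?] at hy
        rw [PySem.Chars.splitMax?] at hy
        simp only [show (":".toList.isEmpty) = false by decide, Bool.false_eq_true, if_false,
          Option.map_some, Option.getD_some] at hy
        rcases pvGetD_cases (List.map String.ofList
            (PySem.Chars.splitOnMax (String.ofList pc).toList ":".toList 1)) 1 with hcase | hcase
        · rw [hcase] at hy; simp at hy
        · rw [List.mem_map] at hcase
          obtain ⟨qc, hqc, hqe⟩ := hcase
          rw [← hqe] at hy
          rw [String.toList_ofList] at hy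
          have := pvSplitOnMax_subset hqc hy
          rwa [String.toList_ofList] at this
      have hx2 := hsub x hxq
      exact ⟨pvSplitOn_subset hpc hx2, fun hxc => pvSplitOn_not_mem hpc (by rwa [hxc] at hx2)⟩
    · simp at hpf
  · rw [List.mem_map] at hf
    obtain ⟨p, hp, rfl⟩ := hf
    rw [List.mem_map] at hp
    obtain ⟨pc, hpc, rfl⟩ := hp
    refine ⟨by rw [PySem.Str.toList_strip]; exact pvOK_strip _, ?_⟩
    intro x hx
    rw [PySem.Str.toList_strip, String.toList_ofList] at hx
    have hx2 := pv_mem_strip hx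
    exact ⟨pvSplitOn_subset hpc hx2, fun hxc => pvSplitOn_not_mem hpc (by rwa [hxc] at hx2)⟩

theorem pvPartsA_eq_pvFieldsB : pvPartsA = pvFieldsB := rfl

-- the four padded fields of a line
def pvF (l0 : String) (i : Nat) : String := (pvPartsA (PySem.Str.strip l0)).getD i ""

theorem pvF_spec (l0 : String) (i : Nat) :
    pvOK (pvF l0 i).toList ∧ ∀ x ∈ (pvF l0 i).toList, x ∈ l0.toList ∧ x ≠ ';' := by
  rw [pvF]
  rcases pvGetD_cases (pvPartsA (PySem.Str.strip l0)) i with h | h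
  · rw [h]; exact ⟨pvOK_nil, by intro x hx; simp at hx⟩
  · obtain ⟨hok, hsub⟩ := pvParts_spec _ _ h
    refine ⟨hok, ?_⟩
    intro x hx
    obtain ⟨hmem, hne⟩ := hsub x hx
    rw [PySem.Str.toList_strip] at hmem
    exact ⟨pv_mem_strip hmem, hne⟩

theorem pvMkLineA_toList (l0 : String) :
    (pvMkLineA l0).toList =
      (pvF l0 0).toList ++ ';' :: ((pvF l0 1).toList ++ ';' :: ((pvF l0 2).toList ++ ';' :: (pvF l0 3).toList)) := by
  rw [pvMkLineA]
  simp only [PySem.Str.toList_join, PySem.Chars.join]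
  simp [List.intercalate, pvF]

theorem pvTripletB_eq (l0 : String) : pvTripletB l0 = (pvF l0 1, pvF l0 2, pvF l0 3) := by
  rw [pvTripletB]
  simp only [← pvPartsA_eq_pvFieldsB]
  rw [pvGetD_pad, pvGetD_pad, pvGetD_pad]
  rfl

theorem pvMkLineA_ne_nil (l0 : String) : (pvMkLineA l0).toList ≠ [] := by
  rw [pvMkLineA_toList]
  simp

theorem pvMkLineA_no_newline (l0 : String) (h : '\n' ∉ l0.toList) : '\n' ∉ (pvMkLineA l0).toList := by
  rw [pvMkLineA_toList]
  intro hx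
  simp only [List.mem_append, List.mem_cons] at hx
  have hF : ∀ i, '\n' ∉ (pvF l0 i).toList := by
    intro i hni
    exact h ((pvF_spec l0 i).2 _ hni).1
  rcases hx with h1 | h1 | h1 | h1 | h1 | h1 | h1
  · exact hF 0 h1
  · exact absurd h1 (by decide)
  · exact hF 1 h1
  · exact absurd h1 (by decide)
  · exact hF 2 h1
  · exact absurd h1 (by decide)
  · exact hF 3 h1

theorem pvMkLineA_ok (l0 : String) : pvOK (pvMkLineA l0).toList := by
  rw [pvMkLineA_toList]
  constructor
  · intro c hc
    cases h0 : (pvF l0 0).toList with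
    | nil =>
      rw [h0] at hc
      simp at hc
      subst hc
      decide
    | cons a t =>
      rw [h0] at hc
      simp at hc
      exact (pvF_spec l0 0).1.1 c (by rw [h0, hc]; rfl)
  · intro c hc
    have e : (pvF l0 0).toList ++ ';' :: ((pvF l0 1).toList ++ ';' :: ((pvF l0 2).toList ++ ';' :: (pvF l0 3).toList)) =
        ((pvF l0 0).toList ++ ';' :: ((pvF l0 1).toList ++ ';' :: ((pvF l0 2).toList ++ [';'])) ) ++ (pvF l0 3).toList := by
      simp
    rw [e] at hc
    cases h3 : (pvF l0 3).toList with
    | nil =>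
      rw [h3, List.append_nil] at hc
      have e2 : (pvF l0 0).toList ++ ';' :: ((pvF l0 1).toList ++ ';' :: ((pvF l0 2).toList ++ [';'])) =
          ((pvF l0 0).toList ++ ';' :: ((pvF l0 1).toList ++ ';' :: (pvF l0 2).toList)) ++ [';'] := by simp
      rw [e2, List.getLast?_concat] at hc
      simp at hc
      subst hc
      decide
    | cons a t =>
      rw [h3] at hc
      rw [List.getLast?_append_of_ne_nil _ (by simp)] at hc
      exact (pvF_spec l0 3).1.2 c (by rw [h3]; exact hc)

-- re-splitting a serialized line yields exactly the four fields
theorem pvHsem (l0 : String) :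
    ∀ p ∈ [(pvF l0 0).toList, (pvF l0 1).toList, (pvF l0 2).toList, (pvF l0 3).toList], ';' ∉ p := by
  intro p hp
  simp only [List.mem_cons, List.not_mem_nil, or_false] at hp
  intro hc
  rcases hp with h | h | h | h
  · rw [h] at hc; exact ((pvF_spec l0 0).2 ';' hc).2 rfl
  · rw [h] at hc; exact ((pvF_spec l0 1).2 ';' hc).2 rfl
  · rw [h] at hc; exact ((pvF_spec l0 2).2 ';' hc).2 rfl
  · rw [h] at hc; exact ((pvF_spec l0 3).2 ';' hc).2 rfl

theorem pvMkLineA_resplit (l0 : String) :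
    (PySem.Str.split? (pvMkLineA l0) ";").getD [] = [pvF l0 0, pvF l0 1, pvF l0 2, pvF l0 3] := by
  rw [pvStrSplit _ ";" (by decide)]
  have e : (pvMkLineA l0).toList =
      List.intercalate [';'] [(pvF l0 0).toList, (pvF l0 1).toList, (pvF l0 2).toList, (pvF l0 3).toList] := by
    rw [pvMkLineA_toList]
    simp [List.intercalate]
  rw [e, show (";".toList) = [';'] by simp,
    pvSplitOn_intercalate ';' _ (by simp) (pvHsem l0)]
  simp [String.ofList_toList]

-- strip is the identity on the ";"-joined serialized lines
theorem pvJoin_ok (lns : List String) (h : ∀ l ∈ lns, (l.toList ≠ [] ∧ pvOK l.toList)) :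
    pvOK (PySem.Str.join "\n" lns).toList := by
  rw [PySem.Str.toList_join, PySem.Chars.join]
  induction lns with
  | nil => exact pvOK_nil
  | cons p ps ih =>
    cases ps with
    | nil => simpa [List.intercalate] using (h p (by simp)).2
    | cons q qs =>
      have e : "\n".toList.intercalate (List.map String.toList (p :: q :: qs)) =
          p.toList ++ '\n' :: "\n".toList.intercalate (List.map String.toList (q :: qs)) := by
        simp [List.intercalate]
      rw [e]
      have hq := ih (fun l hl => h l (List.mem_cons_of_mem p hl))
      have hqne : "\n".toList.intercalate (List.map String.toList (q :: qs)) ≠ [] := by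
        have hqn := (h q (by simp)).1
        cases qs with
        | nil => simpa [List.intercalate] using hqn
        | cons r rs => simp [List.intercalate]
      constructor
      · intro c hc
        rw [List.head?_append_of_ne_nil _ (h p (by simp)).1] at hc
        exact (h p (by simp)).2.1 c hc
      · intro c hc
        rw [List.getLast?_append_of_ne_nil _ (by simp)] at hc
        rw [show ('\n' :: "\n".toList.intercalate (List.map String.toList (q :: qs))) =
            ['\n'] ++ "\n".toList.intercalate (List.map String.toList (q :: qs)) from rfl] at hc
        rw [List.getLast?_append_of_ne_nil _ hqne] at hc
        exact hq.2 c hc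

theorem pvJoin_resplit (lns : List String) (hne : lns ≠ []) (h : ∀ l ∈ lns, '\n' ∉ l.toList) :
    (PySem.Str.split? (PySem.Str.join "\n" lns) "\n").getD [] = lns := by
  rw [pvStrSplit _ "\n" (by decide)]
  rw [PySem.Str.toList_join, PySem.Chars.join, show ("\n".toList) = ['\n'] from rfl]
  have hns : ∀ p ∈ List.map String.toList lns, '\n' ∉ p := by
    intro p hp
    rw [List.mem_map] at hp
    obtain ⟨l, hl, rfl⟩ := hp
    exact h l hl
  rw [pvSplitOn_intercalate '\n' _ (by simpa using hne) hns]
  have hid : ∀ l ∈ lns, String.ofList l.toList = l := fun l _ => String.ofList_toList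
  rw [List.map_map]
  calc List.map (String.ofList ∘ String.toList) lns = List.map id lns := by
        apply List.map_congr_left; intro l _; exact String.ofList_toList
    _ = lns := List.map_id lns

-- B's loop body agrees with A's serialize-then-reparse loop body, on every line
theorem pvPerLine (l0 : String) (acc : List (String × String × String)) :
    (let parts := (PySem.Str.split? (pvMkLineA l0) ";").getD []
     if 3 ≤ parts.length then
       acc ++ [(PySem.Str.strip (parts.getD 1 ""), PySem.Str.strip (parts.getD 2 ""),
                if 3 < parts.length then PySem.Str.strip (parts.getD 3 "") else "[]")]
     else acc) = acc ++ [pvTripletB l0] := by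
  rw [pvMkLineA_resplit]
  have hstrip : ∀ i, PySem.Str.strip (pvF l0 i) = pvF l0 i := by
    intro i
    rw [PySem.Str.strip, pv_strip_eq_self _ (pvF_spec l0 i).1, String.ofList_toList]
  simp only [List.length_cons, List.length_nil, List.getD]
  norm_num
  rw [pvTripletB_eq]
  simp [hstrip 1, hstrip 2, hstrip 3]

theorem pvSplitlines_str (s l : String) (hl : l ∈ PySem.Str.splitlines s) : '\n' ∉ l.toList := by
  rw [PySem.Str.splitlines] at hl
  rw [List.mem_map] at hl
  obtain ⟨pc, hpc, rfl⟩ := hl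
  rw [String.toList_ofList]
  exact pvSplitlines_no_newline hpc

theorem pv_main (resp : String) : get_processed_model_resp resp = get_processed_model_resp_alt resp := by
  unfold get_processed_model_resp get_processed_model_resp_alt
  set sp := (PySem.Str.split? resp "THEOREM_SEQUENCE:\n").getD [] with hsp
  by_cases hlen : 1 < sp.length
  · have hlen2 : ¬ sp.length < 2 := by omega
    simp only [hlen, if_true, hlen2, if_false]
    set tail := sp.getD 1 "" with htl
    by_cases htail : tail = ""
    · rw [htail]
      norm_num
      decide
    · simp only [ne_eq, htail, not_false_eq_true, if_true]
      rw [convert_theorem_seqs_format_string]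
      set L := PySem.Str.splitlines (PySem.Str.strip (PySem.Str.stripChars tail "'")) with hL
      cases hLc : L with
      | nil =>
        simp only [List.map_nil]
        norm_num
        decide
      | cons l ls =>
        have hnl : ∀ l' ∈ (l :: ls), '\n' ∉ l'.toList := fun l' hl' =>
          pvSplitlines_str (PySem.Str.strip (PySem.Str.stripChars tail "'")) l' (by rw [← hL, hLc]; exact hl')
        have hjoin_ne : PySem.Str.join "\n" (L.map pvMkLineA) ≠ "" := by
          intro hcon
          have : (PySem.Str.join "\n" (L.map pvMkLineA)).toList = [] := by rw [hcon]; rfl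
          rw [PySem.Str.toList_join, PySem.Chars.join, hLc] at this
          cases hmk : (pvMkLineA l).toList with
          | nil => exact pvMkLineA_ne_nil l hmk
          | cons a t =>
            cases ls with
            | nil => simp [List.intercalate, hmk] at this
            | cons q qs => simp [List.intercalate, hmk] at this
        rw [hLc] at hjoin_ne
        rw [if_neg hjoin_ne]
        have hok : pvOK (PySem.Str.join "\n" ((l :: ls).map pvMkLineA)).toList := by
          apply pvJoin_ok
          intro x hx
          rw [List.mem_map] at hx
          obtain ⟨y, hy, rfl⟩ := hx
          exact ⟨pvMkLineA_ne_nil y, pvMkLineA_ok y⟩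
        have hstripid : PySem.Str.strip (PySem.Str.join "\n" ((l :: ls).map pvMkLineA)) =
            PySem.Str.join "\n" ((l :: ls).map pvMkLineA) := by
          rw [PySem.Str.strip, pv_strip_eq_self _ hok, String.ofList_toList]
        rw [hstripid]
        rw [pvJoin_resplit _ (by simp) ?_]
        · rw [List.foldl_map]
          have : ∀ (acc : List (String × String × String)) (x : String), x ∈ (l :: ls) →
              (fun acc line =>
                let parts := (PySem.Str.split? line ";").getD []
                if 3 ≤ parts.length then
                  acc ++ [(PySem.Str.strip (parts.getD 1 ""), PySem.Str.strip (parts.getD 2 ""),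
                           if 3 < parts.length then PySem.Str.strip (parts.getD 3 "") else "[]")]
                else acc) acc (pvMkLineA x) = acc ++ [pvTripletB x] := by
            intro acc x _
            exact pvPerLine x acc
          rw [PySem.List.foldl_congr_mem (l :: ls) _ (fun acc x => acc ++ [pvTripletB x]) []
            (fun acc x hx => this acc x hx)]
          rw [PySem.List.foldl_append_singleton_eq_map]
          simp
        · intro x hx
          rw [List.mem_map] at hx
          obtain ⟨y, hy, rfl⟩ := hx
          exact pvMkLineA_no_newline y (hnl y hy)
  · have hlen2 : sp.length < 2 := by omega
    simp [hlen, hlen2]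

-- ===== VERDICT (by name: the statement is the Claim_ definition above) =====
theorem get_processed_model_resp_spec : Claim_equal_get_processed_model_resp := by
  intro resp _
  unfold Spec_get_processed_model_resp
  exact pv_main resp
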